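-- pv_equiv track=rewrite | github.com/samliddicott/mcpash | src/mctash/lexer.py | _scan_ansi_c_single
-- ===== SOURCE A (Python) =====
-- def _scan_ansi_c_single(source: str, start: int) -> tuple[str, int]:
--     if start + 1 >= len(source) or source[start] != "$" or source[start + 1] != "'":
--         return source[start:start + 1], start + 1
--     i = start + 2
--     while i < len(source):
--         ch = source[i]
--         if ch == "\\" and i + 1 < len(source):
--             i += 2
--             continue
--         if ch == "'":
--             return source[start : i + 1], i + 1
--         i += 1
--     return source[start:i], i
-- ===== SOURCE B (Python) =====
-- def _scan_ansi_c_single(source: str, start: int) -> tuple[str, int]: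
--     if source[start:start + 2] != "$'":
--         return source[start:start + 1], start + 1
--     j = source.find("'", start + 2)
--     while j != -1:
--         k = j - 1
--         while k >= start + 2 and source[k] == "\\":
--             k -= 1
--         if (j - 1 - k) % 2 == 0:
--             return source[start:j + 1], j + 1
--         j = source.find("'", j + 1)
--     return source[start:], len(source)
-- ===== Notes on version B (the rewrite author's own statement) =====
-- stated objective: faster
-- what changed: Replaces A's per-character while-loop (escape branch i+=2) by repeated str.find jumps to the next quote, classifying each found quote as escaped or closing by the parity of the run of backslashes immediately before it.
-- outside the precondition, e.g. on _scan_ansi_c_single("$'\\a", -4): A returns ("$'", 2), B returns ("$'\\a", 4); on _scan_ansi_c_single('a', -3): A raises IndexError, B returns ('', -2)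
import Mathlib
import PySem

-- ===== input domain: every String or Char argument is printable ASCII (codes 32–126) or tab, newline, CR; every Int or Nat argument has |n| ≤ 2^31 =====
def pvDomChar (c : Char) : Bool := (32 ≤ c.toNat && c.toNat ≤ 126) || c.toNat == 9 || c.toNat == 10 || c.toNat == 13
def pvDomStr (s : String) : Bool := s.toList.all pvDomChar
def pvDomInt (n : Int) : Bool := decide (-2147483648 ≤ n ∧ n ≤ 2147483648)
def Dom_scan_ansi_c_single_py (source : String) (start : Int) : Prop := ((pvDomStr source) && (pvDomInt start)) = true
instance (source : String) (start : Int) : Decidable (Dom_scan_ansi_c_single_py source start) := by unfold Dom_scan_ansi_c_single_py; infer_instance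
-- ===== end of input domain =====

-- B replaces A's per-character scan by str.find jumps to each quote plus a backslash-run
-- parity test; equivalence is proved for all nonnegative start positions.


-- ===== PORT A =====
-- the while loop of A: i walks the string; an escape pair advances by 2. fuel only bounds
-- the number of loop steps (callers pass one more than the steps remaining); never exhausted.
def scan_ansi_c_single_loop (source : String) (start : Int) (fuel : Nat) (i : Int) : String × Int :=
  match fuel with
  | 0 => (PySem.Str.slice source (some start) (some i), i)
  | fuel' + 1 =>
    if i < PySem.Str.len source then
      match PySem.Str.pyGet? source i with
      | none =>
        -- Python raises IndexError here (reachable only for start < -len(source)); Pre_ excludes it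
        (PySem.Str.slice source (some start) (some i), i)
      | some ch =>
        if ch = '\\' ∧ i + 1 < PySem.Str.len source then
          scan_ansi_c_single_loop source start fuel' (i + 2)
        else if ch = '\'' then
          (PySem.Str.slice source (some start) (some (i + 1)), i + 1)
        else
          scan_ansi_c_single_loop source start fuel' (i + 1)
    else (PySem.Str.slice source (some start) (some i), i)

def scan_ansi_c_single_py (source : String) (start : Int) : String × Int :=
  -- Python's source[start] raises for start < -len(source); pyGet? is none there and the
  -- guard then takes the first branch (Pre_ excludes those inputs)
  if start + 1 ≥ PySem.Str.len source ∨ PySem.Str.pyGet? source start ≠ some '$' ∨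
      PySem.Str.pyGet? source (start + 1) ≠ some '\'' then
    (PySem.Str.slice source (some start) (some (start + 1)), start + 1)
  else
    scan_ansi_c_single_loop source start
      ((PySem.Str.len source - (start + 2)).toNat + 1) (start + 2)

-- ===== PORT B =====
-- Source B's inner while: step k left over backslashes, floored at stop (fuel bounds the steps)
def scan_alt_runStart (source : String) (stop : Int) (fuel : Nat) (k : Int) : Int :=
  match fuel with
  | 0 => k
  | fuel' + 1 =>
    if stop ≤ k ∧ PySem.Str.pyGet? source k = some '\\' then
      scan_alt_runStart source stop fuel' (k - 1)
    else k

-- Source B's outer while over successive find results (fuel bounds the quote jumps)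
def scan_alt_loop (source : String) (start : Int) (fuel : Nat) (j : Int) : String × Int :=
  match fuel with
  | 0 => (PySem.Str.slice source (some start) none, PySem.Str.len source)
  | fuel' + 1 =>
    if j ≠ -1 then
      if (j - 1 - scan_alt_runStart source (start + 2)
            ((j - (start + 2) + 1).toNat + 1) (j - 1)) % 2 = 0 then
        (PySem.Str.slice source (some start) (some (j + 1)), j + 1)
      else
        scan_alt_loop source start fuel' (PySem.Str.findFrom source "'" (j + 1))
    else (PySem.Str.slice source (some start) none, PySem.Str.len source)

def scan_ansi_c_single_py_alt (source : String) (start : Int) : String × Int :=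
  if PySem.Str.slice source (some start) (some (start + 2)) ≠ "$'" then
    (PySem.Str.slice source (some start) (some (start + 1)), start + 1)
  else
    scan_alt_loop source start (source.toList.length + 1)
      (PySem.Str.findFrom source "'" (start + 2))

-- ===== PRECONDITION & SPEC =====
-- Pre_ restricts to the lexer's natural domain of nonnegative scan positions: for negative
-- start, A raises IndexError when start < -len(source) and otherwise scans through Python's
-- negative-index wraparound, an artefact outside the function's purpose.
def Pre_scan_ansi_c_single_py (source : String) (start : Int) : Prop := 0 ≤ start
instance (source : String) (start : Int) : Decidable (Pre_scan_ansi_c_single_py source start) := by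
  unfold Pre_scan_ansi_c_single_py; infer_instance

def pvWitness_scan_ansi_c_single_py : String × Int := ("$'a'", 0)

def Spec_scan_ansi_c_single_py (source : String) (start : Int) (out : String × Int) : Prop :=
  out = scan_ansi_c_single_py_alt source start
instance (source : String) (start : Int) (out : String × Int) :
    Decidable (Spec_scan_ansi_c_single_py source start out) := by
  unfold Spec_scan_ansi_c_single_py; infer_instance

-- ===== CLAIM (what is proved, stated in full; the proofs are below) =====
def Claim_equal_scan_ansi_c_single_py : Prop := ∀ (source : String) (start : Int), Dom_scan_ansi_c_single_py source start → Pre_scan_ansi_c_single_py source start → Spec_scan_ansi_c_single_py source start (scan_ansi_c_single_py source start)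

-- ===== LEMMAS AND PROOFS =====

theorem pvGet_eq (s : String) (i : Int) (h0 : 0 ≤ i) :
    PySem.Str.pyGet? s i = s.toList[i.toNat]? := by
  conv_lhs => rw [show i = ((i.toNat : Nat) : Int) by omega, PySem.Str.pyGet?_natCast]

theorem pvPrefixSingleton (a : Char) (m : List Char) : [a] <+: m ↔ m[0]? = some a := by
  cases m with
  | nil => simp
  | cons x t =>
    simp only [List.getElem?_cons_zero, Option.some.injEq]
    constructor
    · rintro ⟨u, hu⟩
      simp only [List.cons_append, List.nil_append, List.cons.injEq] at hu
      exact hu.1.symm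
    · rintro rfl; exact ⟨t, rfl⟩

theorem pvSliceAll (s : String) (a : Int) (h0 : 0 ≤ a) :
    PySem.Str.slice s (some a) (some (PySem.Str.len s)) = PySem.Str.slice s (some a) none := by
  unfold PySem.Str.slice
  congr 1
  simp only [PySem.Chars.slice_eq_listSlice]
  rw [PySem.List.slice_toNat _ h0 (by simp [PySem.Str.len]), PySem.List.slice_from _ h0]
  apply List.take_of_length_le
  simp [PySem.Str.len]

theorem pvTake2 (xs : List Char) (a b : Char) :
    xs.take 2 = [a, b] ↔ xs[0]? = some a ∧ xs[1]? = some b := by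
  match xs with
  | [] => simp
  | [x] => simp
  | x :: y :: t => simp [List.take_succ_cons]

theorem pvGuard (s : String) (st : Int) (h0 : 0 ≤ st) :
    PySem.Str.slice s (some st) (some (st + 2)) = "$'" ↔
      (st + 1 < PySem.Str.len s ∧ PySem.Str.pyGet? s st = some '$' ∧
        PySem.Str.pyGet? s (st + 1) = some '\'') := by
  have hlen : PySem.Str.len s = (s.toList.length : Int) := rfl
  rw [← String.toList_inj, PySem.Str.toList_slice]
  simp only [PySem.Chars.slice_eq_listSlice]
  rw [PySem.List.slice_toNat _ h0 (by omega)]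
  rw [show (st + 2).toNat - st.toNat = 2 by omega]
  rw [show ("$'" : String).toList = ['$', '\''] by decide]
  rw [pvTake2, List.getElem?_drop, List.getElem?_drop]
  rw [pvGet_eq s st h0, pvGet_eq s (st + 1) (by omega)]
  rw [show st.toNat + 0 = st.toNat by omega, show (st + 1).toNat = st.toNat + 1 by omega]
  constructor
  · rintro ⟨ha, hb⟩
    obtain ⟨hlt, -⟩ := List.getElem?_eq_some_iff.mp hb
    exact ⟨by omega, ha, hb⟩
  · rintro ⟨-, ha, hb⟩
    exact ⟨ha, hb⟩

-- A's loop at its canonical fuel (one more than the loop steps remaining from i)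
def pvScanA (source : String) (start p : Int) : String × Int :=
  scan_ansi_c_single_loop source start ((PySem.Str.len source - p).toNat + 1) p

theorem pvA_fuel (source : String) (start : Int) :
    ∀ f1 f2 : Nat, ∀ p : Int, (PySem.Str.len source - p).toNat < f1 →
      (PySem.Str.len source - p).toNat < f2 →
      scan_ansi_c_single_loop source start f1 p = scan_ansi_c_single_loop source start f2 p := by
  have hlen : PySem.Str.len source = (source.toList.length : Int) := rfl
  intro f1
  induction f1 with
  | zero => intro f2 p h1 _; omega
  | succ f1' IH =>
    intro f2 p h1 h2
    match f2 with
    | 0 => omega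
    | f2' + 1 =>
      simp only [scan_ansi_c_single_loop]
      by_cases hlt : p < PySem.Str.len source
      · rw [if_pos hlt, if_pos hlt]
        cases hg : PySem.Str.pyGet? source p with
        | none => rfl
        | some ch =>
          dsimp only
          split_ifs with h1c h2c
          · exact IH f2' (p + 2) (by omega) (by omega)
          · rfl
          · exact IH f2' (p + 1) (by omega) (by omega)
      · rw [if_neg hlt, if_neg hlt]

theorem pvA_step_lt (source : String) (start p : Int) (hlt : p < PySem.Str.len source) :
    pvScanA source start p =
      (match PySem.Str.pyGet? source p with
      | none => (PySem.Str.slice source (some start) (some p), p)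
      | some ch =>
        if ch = '\\' ∧ p + 1 < PySem.Str.len source then
          pvScanA source start (p + 2)
        else if ch = '\'' then
          (PySem.Str.slice source (some start) (some (p + 1)), p + 1)
        else
          pvScanA source start (p + 1)) := by
  have hlen : PySem.Str.len source = (source.toList.length : Int) := rfl
  rw [show pvScanA source start p
      = scan_ansi_c_single_loop source start ((PySem.Str.len source - p).toNat + 1) p from rfl]
  simp only [scan_ansi_c_single_loop]
  rw [if_pos hlt]
  cases hg : PySem.Str.pyGet? source p with
  | none => rfl
  | some ch =>
    dsimp only
    split_ifs with h1c h2c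
    · exact pvA_fuel source start ((PySem.Str.len source - p).toNat)
        ((PySem.Str.len source - (p + 2)).toNat + 1) (p + 2) (by omega) (by omega)
    · rfl
    · exact pvA_fuel source start ((PySem.Str.len source - p).toNat)
        ((PySem.Str.len source - (p + 1)).toNat + 1) (p + 1) (by omega) (by omega)

theorem pvA_step_ge (source : String) (start p : Int) (hge : ¬ p < PySem.Str.len source) :
    pvScanA source start p = (PySem.Str.slice source (some start) (some p), p) := by
  unfold pvScanA
  simp only [scan_ansi_c_single_loop]
  rw [if_neg hge]

-- B's outer loop at its canonical fuel
def pvScanB (source : String) (start j : Int) : String × Int :=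
  scan_alt_loop source start
    ((if j = -1 then 0 else (PySem.Str.len source - j).toNat) + 1) j

-- every value source.find("'", p) can take, with the quote/no-quote facts attached
theorem pvFind_facts (source : String) (p : Int) (h0 : 0 ≤ p) (hl : p ≤ PySem.Str.len source) :
    (PySem.Str.findFrom source "'" p = -1 ∧
      (∀ q : Nat, p ≤ (q : Int) → source.toList[q]? ≠ some '\'')) ∨
    (p ≤ PySem.Str.findFrom source "'" p ∧
      PySem.Str.findFrom source "'" p < PySem.Str.len source ∧
      source.toList[(PySem.Str.findFrom source "'" p).toNat]? = some '\'' ∧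
      (∀ r : Nat, p ≤ (r : Int) → (r : Int) < PySem.Str.findFrom source "'" p →
        source.toList[r]? ≠ some '\'')) := by
  have hlen : PySem.Str.len source = (source.toList.length : Int) := rfl
  have hp' : ((p.toNat : Nat) : Int) = p := by omega
  have hpl : p.toNat ≤ source.toList.length := by omega
  have hF : PySem.Str.findFrom source "'" p
      = PySem.Chars.findFrom source.toList "'".toList ((p.toNat : Nat) : Int) := by
    rw [PySem.Str.findFrom_eq, hp']
  by_cases hneg : PySem.Chars.findFrom source.toList "'".toList ((p.toNat : Nat) : Int) = -1
  · left
    refine ⟨by rw [hF, hneg], ?_⟩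
    have hnq := (PySem.Chars.findFrom_natCast_eq_neg_one_iff source.toList "'".toList
      p.toNat hpl).mp hneg
    intro q hq1 hq2
    apply hnq
    have hql : q < source.toList.length := by
      obtain ⟨h, -⟩ := List.getElem?_eq_some_iff.mp hq2
      omega
    have hdq : (source.toList.drop p.toNat)[q - p.toNat]? = some '\'' := by
      rw [List.getElem?_drop, show p.toNat + (q - p.toNat) = q by omega]
      exact hq2
    have hmem : '\'' ∈ source.toList.drop p.toNat := List.mem_of_getElem? hdq
    obtain ⟨s1, s2, hsplit⟩ := List.append_of_mem hmem
    rw [show ("'" : String).toList = ['\''] by decide]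
    exact ⟨s1, s2, by rw [hsplit]; simp⟩
  · right
    obtain ⟨hle, hpre, hmin⟩ := PySem.Chars.findFrom_natCast_spec source.toList "'".toList
      p.toNat hpl hneg
    rw [show ("'" : String).toList = ['\''] by decide] at hle hpre hmin hF
    rw [pvPrefixSingleton, List.getElem?_drop, Nat.add_zero] at hpre
    rw [hF]
    set f := PySem.Chars.findFrom source.toList ['\''] ((p.toNat : Nat) : Int) with hfdef
    have hfl : f.toNat < source.toList.length := by
      obtain ⟨h, -⟩ := List.getElem?_eq_some_iff.mp hpre
      omega
    refine ⟨by omega, by omega, hpre, ?_⟩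
    intro r h1 h2 hc
    apply hmin r (by omega) (by omega)
    rw [pvPrefixSingleton, List.getElem?_drop, Nat.add_zero]
    exact hc

theorem pvB_fuel (source : String) (start : Int) :
    ∀ f1 f2 : Nat, ∀ j : Int,
      (j = -1 ∨ (0 ≤ j ∧ j < PySem.Str.len source)) →
      (if j = -1 then 0 else (PySem.Str.len source - j).toNat) < f1 →
      (if j = -1 then 0 else (PySem.Str.len source - j).toNat) < f2 →
      scan_alt_loop source start f1 j = scan_alt_loop source start f2 j := by
  have hlen : PySem.Str.len source = (source.toList.length : Int) := rfl
  intro f1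
  induction f1 with
  | zero => intro f2 j _ h1 _; omega
  | succ f1' IH =>
    intro f2 j hj h1 h2
    match f2 with
    | 0 => omega
    | f2' + 1 =>
      simp only [scan_alt_loop]
      rcases hj with hj | hj
      · rw [if_neg (by omega : ¬ j ≠ -1), if_neg (by omega : ¬ j ≠ -1)]
      · rw [if_pos (by omega : j ≠ -1), if_pos (by omega : j ≠ -1)]
        split_ifs with hpar
        · rfl
        · rw [if_neg (by omega : ¬ j = -1)] at h1 h2
          rcases pvFind_facts source (j + 1) (by omega) (by omega) with ⟨hneg, -⟩ | ⟨ha, hb, -, -⟩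
          · exact IH f2' _ (Or.inl hneg) (by rw [if_pos hneg]; omega) (by rw [if_pos hneg]; omega)
          · refine IH f2' _ (Or.inr ⟨by omega, hb⟩) ?_ ?_ <;>
              · rw [if_neg (by omega : ¬ PySem.Str.findFrom source "'" (j + 1) = -1)]
                omega

theorem pvB_neg (source : String) (start : Int) :
    pvScanB source start (-1) = (PySem.Str.slice source (some start) none, PySem.Str.len source) := by
  unfold pvScanB
  simp only [scan_alt_loop]
  rw [if_neg (by omega : ¬ (-1 : Int) ≠ -1)]

theorem pvB_step (source : String) (start j : Int) (hj0 : 0 ≤ j)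
    (hjl : j < PySem.Str.len source) :
    pvScanB source start j =
      (if (j - 1 - scan_alt_runStart source (start + 2)
            ((j - (start + 2) + 1).toNat + 1) (j - 1)) % 2 = 0 then
        (PySem.Str.slice source (some start) (some (j + 1)), j + 1)
      else
        pvScanB source start (PySem.Str.findFrom source "'" (j + 1))) := by
  have hlen : PySem.Str.len source = (source.toList.length : Int) := rfl
  rw [show pvScanB source start j
      = scan_alt_loop source start
          ((if j = -1 then 0 else (PySem.Str.len source - j).toNat) + 1) j from rfl]
  rw [show (if j = -1 then 0 else (PySem.Str.len source - j).toNat)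
      = (PySem.Str.len source - j).toNat from by rw [if_neg (by omega : ¬ j = -1)]]
  simp only [scan_alt_loop]
  rw [if_pos (by omega : j ≠ -1)]
  split_ifs with hpar
  · rfl
  · rw [show pvScanB source start (PySem.Str.findFrom source "'" (j + 1))
      = scan_alt_loop source start
          ((if PySem.Str.findFrom source "'" (j + 1) = -1 then 0
            else (PySem.Str.len source - PySem.Str.findFrom source "'" (j + 1)).toNat) + 1)
          (PySem.Str.findFrom source "'" (j + 1)) from rfl]
    rcases pvFind_facts source (j + 1) (by omega) (by omega) with ⟨hneg, -⟩ | ⟨ha, hb, -, -⟩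
    · refine pvB_fuel source start _ _ _ (Or.inl hneg) ?_ ?_ <;> (rw [if_pos hneg]; omega)
    · refine pvB_fuel source start _ _ _ (Or.inr ⟨by omega, hb⟩) ?_ ?_ <;>
        · rw [if_neg (by omega : ¬ PySem.Str.findFrom source "'" (j + 1) = -1)]
          omega

theorem pvRun_spec (source : String) (stop : Int) (hstop : 0 < stop) :
    ∀ fuel : Nat, ∀ k0 : Int, (k0 + 1 - stop).toNat < fuel → stop - 1 ≤ k0 →
      (stop - 1 ≤ scan_alt_runStart source stop fuel k0 ∧
       scan_alt_runStart source stop fuel k0 ≤ k0 ∧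
       (∀ r : Nat, scan_alt_runStart source stop fuel k0 < (r : Int) → (r : Int) ≤ k0 →
          source.toList[r]? = some '\\') ∧
       (stop ≤ scan_alt_runStart source stop fuel k0 →
          source.toList[(scan_alt_runStart source stop fuel k0).toNat]? ≠ some '\\')) := by
  intro fuel
  induction fuel with
  | zero => intro k0 h1 _; omega
  | succ fuel' IH =>
    intro k0 h1 hk
    simp only [scan_alt_runStart]
    by_cases hc : stop ≤ k0 ∧ PySem.Str.pyGet? source k0 = some '\\'
    · rw [if_pos hc]
      obtain ⟨hs, hb⟩ := hc
      obtain ⟨i1, i2, i3, i4⟩ := IH (k0 - 1) (by omega) (by omega)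
      refine ⟨i1, by omega, ?_, i4⟩
      intro r hr1 hr2
      by_cases hr : (r : Int) = k0
      · have hr' : r = k0.toNat := by omega
        subst hr'
        rw [← pvGet_eq source k0 (by omega)]
        exact hb
      · exact i3 r hr1 (by omega)
    · rw [if_neg hc]
      refine ⟨hk, le_refl _, ?_, ?_⟩
      · intro r hr1 hr2; omega
      · intro hs hcontra
        exact hc ⟨hs, by rw [pvGet_eq source k0 (by omega)]; exact hcontra⟩

theorem pvA_noquote (source : String) (start : Int) (hst : 0 ≤ start) :
    ∀ m : Nat, ∀ p : Int, (PySem.Str.len source - p).toNat = m → 0 ≤ p →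
      p ≤ PySem.Str.len source →
      (∀ q : Nat, p ≤ (q : Int) → source.toList[q]? ≠ some '\'') →
      pvScanA source start p =
        (PySem.Str.slice source (some start) none, PySem.Str.len source) := by
  have hlen : PySem.Str.len source = (source.toList.length : Int) := rfl
  intro m
  induction m using Nat.strong_induction_on with
  | _ m IH =>
    intro p hm h0 hn hq
    by_cases hlt : p < PySem.Str.len source
    · rw [pvA_step_lt source start p hlt]
      have hpl : p.toNat < source.toList.length := by omega
      have hget : PySem.Str.pyGet? source p = some (source.toList[p.toNat]) := by
        rw [pvGet_eq source p h0]; exact List.getElem?_eq_getElem hpl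
      split
      · next heq => rw [hget] at heq; cases heq
      · next ch heq =>
        rw [hget] at heq
        have hch : ch = source.toList[p.toNat] := (Option.some.inj heq).symm
        split_ifs with h1 h2
        · exact IH _ (by omega) (p + 2) rfl (by omega) (by omega)
            (fun q hq1 => hq q (by omega))
        · exfalso
          apply hq p.toNat (by omega)
          rw [List.getElem?_eq_getElem hpl, ← hch, h2]
        · exact IH _ (by omega) (p + 1) rfl (by omega) (by omega)
            (fun q hq1 => hq q (by omega))
    · rw [pvA_step_ge source start p hlt]
      have hpn : p = PySem.Str.len source := by omega
      subst hpn
      rw [pvSliceAll source start hst]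

theorem pvA_run (source : String) (start f : Int) (hst : 0 ≤ start)
    (hf0 : 0 ≤ f) (hfn : f < PySem.Str.len source)
    (hquote : source.toList[f.toNat]? = some '\'') :
    ∀ m : Nat, ∀ q : Int, (f - q).toNat = m → 0 ≤ q → q ≤ f →
      (∀ r : Nat, q ≤ (r : Int) → (r : Int) ≤ f - 1 → source.toList[r]? = some '\\') →
      pvScanA source start q =
        (if (f - q) % 2 = 0 then
          (PySem.Str.slice source (some start) (some (f + 1)), f + 1)
        else pvScanA source start (f + 1)) := by
  have hlen : PySem.Str.len source = (source.toList.length : Int) := rfl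
  intro m
  induction m using Nat.strong_induction_on with
  | _ m IH =>
    intro q hm h0 hqf hrun
    have hql : q < PySem.Str.len source := by omega
    have hpl : q.toNat < source.toList.length := by omega
    have hget : PySem.Str.pyGet? source q = some (source.toList[q.toNat]) := by
      rw [pvGet_eq source q h0]; exact List.getElem?_eq_getElem hpl
    by_cases hqe : q = f
    · subst hqe
      rw [pvA_step_lt source start q hql]
      split
      · next heq => rw [hget] at heq; cases heq
      · next ch heq =>
        rw [hget] at heq
        have hch : ch = source.toList[q.toNat] := (Option.some.inj heq).symm
        have hchq : ch = '\'' := by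
          rw [hch]
          have h := List.getElem?_eq_getElem hpl
          rw [hquote] at h
          exact (Option.some.inj h).symm
        rw [if_neg (by rw [hchq]; rintro ⟨h, -⟩; cases h), if_pos hchq]
        rw [if_pos (by omega : (q - q) % 2 = 0)]
    · have hqlt : q < f := by omega
      have hbs : source.toList[q.toNat]? = some '\\' :=
        hrun q.toNat (by omega) (by omega)
      have hchv : source.toList[q.toNat] = '\\' := by
        rw [List.getElem?_eq_getElem hpl] at hbs
        exact Option.some.inj hbs
      rw [pvA_step_lt source start q hql]
      split
      · next heq => rw [hget] at heq; cases heq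
      · next ch heq =>
        rw [hget] at heq
        have hch : ch = '\\' := by
          have := (Option.some.inj heq).symm
          rw [this, hchv]
        rw [if_pos ⟨hch, by omega⟩]
        by_cases hq2 : q + 2 ≤ f
        · rw [IH _ (by omega) (q + 2) rfl (by omega) hq2
            (fun r hr1 hr2 => hrun r (by omega) hr2)]
          rw [show f - (q + 2) = f - q - 2 by ring]
          by_cases hpar : (f - q) % 2 = 0
          · rw [if_pos (by omega), if_pos hpar]
          · rw [if_neg (by omega), if_neg hpar]
        · have hq1 : q = f - 1 := by omega
          rw [if_neg (by omega), show q + 2 = f + 1 by omega]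

theorem pvA_walk (source : String) (start f k p0 : Int) (hst : 0 ≤ start)
    (hp0 : start + 2 ≤ p0)
    (hkf : k ≤ f - 1) (hfn : f < PySem.Str.len source)
    (hkb : start + 2 ≤ k → source.toList[k.toNat]? ≠ some '\\')
    (hnq : ∀ r : Nat, p0 ≤ (r : Int) → (r : Int) < f → source.toList[r]? ≠ some '\'') :
    ∀ m : Nat, ∀ q : Int, (k + 1 - q).toNat = m → p0 ≤ q → q ≤ k + 1 →
      pvScanA source start q = pvScanA source start (k + 1) := by
  have hlen : PySem.Str.len source = (source.toList.length : Int) := rfl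
  intro m
  induction m using Nat.strong_induction_on with
  | _ m IH =>
    intro q hm hq1 hq2
    by_cases hqe : q = k + 1
    · rw [hqe]
    · have hqk : q ≤ k := by omega
      have hql : q < PySem.Str.len source := by omega
      have hpl : q.toNat < source.toList.length := by omega
      have hget : PySem.Str.pyGet? source q = some (source.toList[q.toNat]) := by
        rw [pvGet_eq source q (by omega)]; exact List.getElem?_eq_getElem hpl
      have hnq' : source.toList[q.toNat] ≠ '\'' := by
        intro hc
        exact hnq q.toNat (by omega) (by omega) (by rw [List.getElem?_eq_getElem hpl, hc])
      rw [pvA_step_lt source start q hql]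
      split
      · next heq => rw [hget] at heq; cases heq
      · next ch heq =>
        rw [hget] at heq
        have hch : ch = source.toList[q.toNat] := (Option.some.inj heq).symm
        split_ifs with h1 h2
        · have hqk' : q < k := by
            rcases Nat.lt_or_ge q.toNat k.toNat with h | h
            · omega
            · exfalso
              have hqek : q = k := by omega
              apply hkb (by omega)
              rw [← hqek, List.getElem?_eq_getElem hpl, ← hch, h1.1]
          exact IH _ (by omega) (q + 2) rfl (by omega) (by omega)
        · exact absurd (hch ▸ h2) hnq'
        · exact IH _ (by omega) (q + 1) rfl (by omega) (by omega)

theorem pvMain (source : String) (start : Int) (hst : 0 ≤ start) :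
    ∀ m : Nat, ∀ p : Int, (PySem.Str.len source - p).toNat = m → start + 2 ≤ p →
      p ≤ PySem.Str.len source →
      (p = start + 2 ∨ source.toList[(p - 1).toNat]? = some '\'') →
      pvScanA source start p = pvScanB source start (PySem.Str.findFrom source "'" p) := by
  have hlen : PySem.Str.len source = (source.toList.length : Int) := rfl
  intro m
  induction m using Nat.strong_induction_on with
  | _ m IH =>
    intro p hm hp2 hpn hinv
    have hp0 : 0 ≤ p := by omega
    rcases pvFind_facts source p hp0 hpn with ⟨hneg, hnq⟩ | ⟨hle, hfn, hquote, hmin⟩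
    · rw [hneg, pvB_neg]
      exact pvA_noquote source start hst _ p rfl hp0 hpn hnq
    · set f := PySem.Str.findFrom source "'" p with hfdef
      have hf0 : 0 ≤ f := by omega
      have hfl : f.toNat < source.toList.length := by omega
      rw [pvB_step source start f hf0 hfn]
      obtain ⟨hk1, hk2, hk3, hk4⟩ :=
        pvRun_spec source (start + 2) (by omega) ((f - (start + 2) + 1).toNat + 1) (f - 1)
          (by omega) (by omega)
      set kk := scan_alt_runStart source (start + 2) ((f - (start + 2) + 1).toNat + 1) (f - 1)
        with hkk
      have hkp : p - 1 ≤ kk := by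
        by_contra hcon
        push_neg at hcon
        have hbs : source.toList[(p - 1).toNat]? = some '\\' :=
          hk3 (p - 1).toNat (by omega) (by omega)
        rcases hinv with h | h
        · omega
        · rw [h] at hbs; cases hbs
      have hwalk := pvA_walk source start f kk p hst hp2 hk2 hfn
        (fun hs => hk4 (by omega))
        (fun r h1 h2 => hmin r h1 h2)
        _ p rfl (le_refl p) (by omega)
      rw [hwalk]
      have hrunp := pvA_run source start f hst hf0 hfn hquote _ (kk + 1) rfl
        (by omega) (by omega)
        (fun r h1 h2 => hk3 r (by omega) (by omega))
      rw [hrunp, show f - (kk + 1) = f - 1 - kk by ring]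
      by_cases hpar : (f - 1 - kk) % 2 = 0
      · rw [if_pos hpar, if_pos hpar]
      · rw [if_neg hpar, if_neg hpar]
        have hIH := IH (PySem.Str.len source - (f + 1)).toNat (by omega) (f + 1) rfl
          (by omega) (by omega)
          (Or.inr (by rw [show f + 1 - 1 = f by ring]; exact hquote))
        exact hIH

-- ===== VERDICT (by name: the statement is the Claim_ definition above) =====
theorem scan_ansi_c_single_py_spec : Claim_equal_scan_ansi_c_single_py := by
  intro source start _hdom hpre
  unfold Spec_scan_ansi_c_single_py
  have hst : 0 ≤ start := hpre
  have hlen : PySem.Str.len source = (source.toList.length : Int) := rfl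
  unfold scan_ansi_c_single_py scan_ansi_c_single_py_alt
  by_cases hC : start + 1 < PySem.Str.len source ∧
      PySem.Str.pyGet? source start = some '$' ∧
      PySem.Str.pyGet? source (start + 1) = some '\''
  · rw [if_neg (by
        rintro (h | h | h)
        · omega
        · exact h hC.2.1
        · exact h hC.2.2),
      if_neg (by
        intro hne
        exact hne ((pvGuard source start hst).mpr hC))]
    have hB : scan_alt_loop source start (source.toList.length + 1)
        (PySem.Str.findFrom source "'" (start + 2))
        = pvScanB source start (PySem.Str.findFrom source "'" (start + 2)) := by
      rcases pvFind_facts source (start + 2) (by omega) (by omega) with ⟨hneg, -⟩ | ⟨ha, hb, -, -⟩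
      · exact pvB_fuel source start _ _ _ (Or.inl hneg)
          (by rw [if_pos hneg]; omega) (by rw [if_pos hneg]; omega)
      · refine pvB_fuel source start _ _ _ (Or.inr ⟨by omega, hb⟩) ?_ ?_ <;>
          · rw [if_neg (by omega : ¬ PySem.Str.findFrom source "'" (start + 2) = -1)]
            omega
    rw [hB]
    exact pvMain source start hst _ (start + 2) rfl (le_refl _) (by omega) (Or.inl rfl)
  · rw [if_pos (by
        by_contra hcon
        push_neg at hcon
        exact hC ⟨by omega, hcon.2.1, hcon.2.2⟩),
      if_pos (by
        intro heq
        exact hC ((pvGuard source start hst).mp heq))]
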